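-- pv_equiv track=rewrite | github.com/pasc/irukandji | irukandji/mailparser/__init__.py | indent_level
-- ===== SOURCE A (Python) =====
-- def indent_level(text):
--     level = 0
--     for tok in text.split():
--         if tok in ['|', '>']:
--             level += 1
--         else:
--             matches = tok.split('>')
--             if len(matches) > 1:
--                 level += len(matches) - 1
--             else:
--                 return level
--
--     return level
-- ===== SOURCE B (Python) =====
-- def indent_level(text):
--     toks = text.split()
--     n = 0
--     while n < len(toks) and ('>' in toks[n] or toks[n] == '|'):
--         n += 1
--     return sum(t.count('>') if '>' in t else 1 for t in toks[:n])
-- ===== Notes on version B (the rewrite author's own statement) =====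
-- stated objective: alternative
-- what changed: Replaces A's single accumulator loop with early return by a generate-prefix-then-reduce decomposition: first find the length of the leading run of indent tokens ('>' in tok or tok == '|'), then sum each kept token's contribution (its '>' count, or 1 for '|').
import Mathlib
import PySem

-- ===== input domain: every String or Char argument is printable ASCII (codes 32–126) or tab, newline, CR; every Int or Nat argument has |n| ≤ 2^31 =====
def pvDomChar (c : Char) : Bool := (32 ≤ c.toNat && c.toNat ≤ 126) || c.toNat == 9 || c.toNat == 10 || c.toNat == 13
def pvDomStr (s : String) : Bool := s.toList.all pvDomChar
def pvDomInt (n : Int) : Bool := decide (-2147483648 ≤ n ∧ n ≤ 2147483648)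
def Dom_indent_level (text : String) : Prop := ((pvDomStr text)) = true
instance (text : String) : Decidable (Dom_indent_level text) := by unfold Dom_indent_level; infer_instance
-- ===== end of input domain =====

-- B replaces A's accumulator loop with early return by a two-phase decomposition:
-- find the length of the leading run of indent tokens, then sum their contributions (alternative, same cost).

-- ===== PORT A =====
def pvGoA : List String → Int → Int
  | [], level => level
  | tok :: rest, level =>
    if tok = "|" ∨ tok = ">" then pvGoA rest (level + 1)
    else
      -- matches = tok.split('>'): nonempty separator, PySem.Chars.splitOn is exact here
      let parts := PySem.Chars.splitOn tok.toList ['>']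
      if parts.length > 1 then pvGoA rest (level + ((parts.length : Int) - 1))
      else level

def indent_level (text : String) : Int :=
  pvGoA (PySem.Str.split₀ text) 0

-- ===== PORT B =====
def pvIsIndentTok (tok : String) : Bool :=
  PySem.Str.isIn ">" tok || tok == "|"

def pvContrib (tok : String) : Int :=
  if PySem.Str.isIn ">" tok then (PySem.Str.count tok ">" : Int) else 1

-- B's while loop: n advances while the predicate holds = length of the matching prefix
def pvPrefixLen : List String → Nat
  | [] => 0
  | tok :: rest => if pvIsIndentTok tok then pvPrefixLen rest + 1 else 0

def indent_level_alt (text : String) : Int :=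
  let toks := PySem.Str.split₀ text
  let n := pvPrefixLen toks
  ((toks.take n).map pvContrib).sum

-- ===== PRECONDITION & SPEC =====
def Spec_indent_level (text : String) (out : Int) : Prop := out = indent_level_alt text
instance (text : String) (out : Int) : Decidable (Spec_indent_level text out) := by unfold Spec_indent_level; infer_instance

-- ===== CLAIM (what is proved, stated in full; the proofs are below) =====
def Claim_equal_indent_level : Prop := ∀ (text : String), Dom_indent_level text → Spec_indent_level text (indent_level text)

-- ===== LEMMAS AND PROOFS =====

theorem pv_count_go_singleton (g : Char) :
    ∀ (fuel : Nat) (l : List Char) (acc : Nat), l.length ≤ fuel →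
      PySem.Chars.count.go [g] fuel l acc = acc + l.count g := by
  intro fuel
  induction fuel with
  | zero =>
    intro l acc h
    have : l = [] := List.eq_nil_of_length_eq_zero (Nat.le_zero.mp h)
    subst this
    simp [PySem.Chars.count.go]
  | succ n ih =>
    intro l acc h
    cases l with
    | nil => simp [PySem.Chars.count.go]
    | cons c rest =>
      simp only [PySem.Chars.count.go]
      by_cases hc : c = g
      · subst hc
        have hp : [c].isPrefixOf (c :: rest) = true := by simp [List.isPrefixOf]
        rw [hp]
        simp only [if_true]
        show PySem.Chars.count.go [c] n rest (acc + 1) = acc + (c :: rest).count c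
        rw [ih rest (acc + 1) (by simpa using Nat.le_of_succ_le_succ h)]
        simp
        omega
      · have hp : [g].isPrefixOf (c :: rest) = false := by
          simp [List.isPrefixOf]
          exact fun hcg => hc hcg.symm
        rw [hp]
        simp only [Bool.false_eq_true, if_false]
        rw [ih rest acc (by simpa using Nat.le_of_succ_le_succ h)]
        simp [hc]

theorem pv_chars_count_singleton (g : Char) (s : List Char) :
    PySem.Chars.count s [g] = s.count g := by
  simp only [PySem.Chars.count, List.isEmpty_cons, Bool.false_eq_true, if_false]
  rw [pv_count_go_singleton g s.length s 0 (le_refl _)]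
  omega

theorem pv_splitOn_go_singleton (g : Char) :
    ∀ (fuel : Nat) (l cur : List Char) (acc : List (List Char)), l.length ≤ fuel →
      (PySem.Chars.splitOn.go [g] fuel l cur acc).length = acc.length + 1 + l.count g := by
  intro fuel
  induction fuel with
  | zero =>
    intro l cur acc h
    have : l = [] := List.eq_nil_of_length_eq_zero (Nat.le_zero.mp h)
    subst this
    simp [PySem.Chars.splitOn.go]
  | succ n ih =>
    intro l cur acc h
    cases l with
    | nil => simp [PySem.Chars.splitOn.go]
    | cons c rest =>
      simp only [PySem.Chars.splitOn.go]
      by_cases hc : c = g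
      · subst hc
        have hp : [c].isPrefixOf (c :: rest) = true := by simp [List.isPrefixOf]
        rw [hp]
        simp only [if_true]
        show (PySem.Chars.splitOn.go [c] n rest [] (cur.reverse :: acc)).length
              = acc.length + 1 + (c :: rest).count c
        rw [ih rest [] (cur.reverse :: acc) (by simpa using Nat.le_of_succ_le_succ h)]
        simp
        omega
      · have hp : [g].isPrefixOf (c :: rest) = false := by
          simp [List.isPrefixOf]
          exact fun hcg => hc hcg.symm
        rw [hp]
        simp only [Bool.false_eq_true, if_false]
        rw [ih rest (c :: cur) acc (by simpa using Nat.le_of_succ_le_succ h)]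
        simp [hc]

theorem pv_splitOn_length (g : Char) (s : List Char) :
    (PySem.Chars.splitOn s [g]).length = s.count g + 1 := by
  simp only [PySem.Chars.splitOn]
  rw [pv_splitOn_go_singleton g (s.length + 1) s [] [] (Nat.le_succ _)]
  simp
  omega

theorem pv_singleton_infix_iff (g : Char) (s : List Char) :
    [g] <:+: s ↔ g ∈ s := by
  constructor
  · rintro ⟨pre, suf, rfl⟩; simp
  · intro h
    obtain ⟨pre, suf, rfl⟩ := List.append_of_mem h
    exact ⟨pre, suf, by simp⟩

theorem pv_isIn_gt (s : List Char) :
    PySem.Chars.isIn ['>'] s = decide ('>' ∈ s) := by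
  by_cases h : '>' ∈ s
  · simp only [h, decide_true]
    exact (PySem.Chars.isIn_iff_infix _ _).mpr ((pv_singleton_infix_iff '>' s).mpr h)
  · simp only [h, decide_false]
    exact (PySem.Chars.isIn_eq_false_iff _ _).mpr
      (fun hinf => h ((pv_singleton_infix_iff '>' s).mp hinf))

theorem pv_goA_eq (toks : List String) :
    ∀ (level : Int),
      pvGoA toks level = level + ((toks.take (pvPrefixLen toks)).map pvContrib).sum := by
  induction toks with
  | nil => intro level; simp [pvGoA, pvPrefixLen]
  | cons tok rest ih =>
    intro level
    by_cases hbar : tok = "|"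
    · subst hbar
      have hpred : pvIsIndentTok "|" = true := by decide
      have hc : pvContrib "|" = 1 := by decide
      simp only [pvGoA]
      simp only [true_or, if_true]
      simp only [pvPrefixLen, hpred, if_true, List.take_succ_cons,
        List.map_cons, List.sum_cons, hc, ih]
      ring
    · by_cases hgt : tok = ">"
      · subst hgt
        have hpred : pvIsIndentTok ">" = true := by decide
        have hc : pvContrib ">" = 1 := by decide
        simp only [pvGoA]
        simp only [or_true, if_true]
        simp only [pvPrefixLen, hpred, if_true, List.take_succ_cons,
          List.map_cons, List.sum_cons, hc, ih]
        ring
      · have hnot : ¬ (tok = "|" ∨ tok = ">") := by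
          rintro (h | h) <;> [exact hbar h; exact hgt h]
        simp only [pvGoA, if_neg hnot]
        by_cases hmem : '>' ∈ tok.toList
        · have hcnt : 0 < tok.toList.count '>' := List.count_pos_iff.mpr hmem
          have hlen : (PySem.Chars.splitOn tok.toList ['>']).length = tok.toList.count '>' + 1 :=
            pv_splitOn_length '>' tok.toList
          have hgt1 : (PySem.Chars.splitOn tok.toList ['>']).length > 1 := by omega
          have hpred : pvIsIndentTok tok = true := by
            simp [pvIsIndentTok, PySem.Str.isIn_eq, pv_isIn_gt, hmem]
          have hc : pvContrib tok = (tok.toList.count '>' : Int) := by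
            simp [pvContrib, PySem.Str.isIn_eq, pv_isIn_gt, hmem, PySem.Str.count_eq,
              pv_chars_count_singleton]
          rw [if_pos hgt1]
          simp only [pvPrefixLen, hpred, if_true, List.take_succ_cons, List.map_cons,
            List.sum_cons, hc, ih, hlen]
          push_cast
          ring
        · have hcnt : tok.toList.count '>' = 0 := List.count_eq_zero.mpr hmem
          have hlen : (PySem.Chars.splitOn tok.toList ['>']).length = 1 := by
            rw [pv_splitOn_length '>' tok.toList, hcnt]
          have hngt1 : ¬ (PySem.Chars.splitOn tok.toList ['>']).length > 1 := by omega
          have hpred : pvIsIndentTok tok = false := by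
            simp [pvIsIndentTok, PySem.Str.isIn_eq, pv_isIn_gt, hmem, hbar]
          rw [if_neg hngt1]
          simp [pvPrefixLen, hpred]

-- ===== VERDICT (by name: the statement is the Claim_ definition above) =====
theorem indent_level_spec : Claim_equal_indent_level := by
  intro text _
  unfold Spec_indent_level indent_level indent_level_alt
  rw [pv_goA_eq (PySem.Str.split₀ text) 0]
  ring
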